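-- pv_equiv track=rewrite | github.com/Oxygen12-cyber/LearningPythonIn14Days | PythonIn14Days/day3_4/recursionNisLowercase.py | is_all_lower
-- ===== SOURCE A (Python) =====
-- def is_all_lower(word):
-- 	if len(word) == 0:
-- 		return True
-- 	else:
-- 		if word[0].islower() == True:
-- 			return is_all_lower(word[1:])
-- 		else:
-- 			return False
-- ===== SOURCE B (Python) =====
-- def is_all_lower(word):
--     ok = True
--     for c in word:
--         ok = ok and c.islower()
--     return ok
-- ===== Notes on version B (the rewrite author's own statement) =====
-- stated objective: faster
-- what changed: Replaced the slice-building recursion with early return (word[1:] copies each step) by a single iterative pass folding a boolean accumulator over the characters.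
import Mathlib
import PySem

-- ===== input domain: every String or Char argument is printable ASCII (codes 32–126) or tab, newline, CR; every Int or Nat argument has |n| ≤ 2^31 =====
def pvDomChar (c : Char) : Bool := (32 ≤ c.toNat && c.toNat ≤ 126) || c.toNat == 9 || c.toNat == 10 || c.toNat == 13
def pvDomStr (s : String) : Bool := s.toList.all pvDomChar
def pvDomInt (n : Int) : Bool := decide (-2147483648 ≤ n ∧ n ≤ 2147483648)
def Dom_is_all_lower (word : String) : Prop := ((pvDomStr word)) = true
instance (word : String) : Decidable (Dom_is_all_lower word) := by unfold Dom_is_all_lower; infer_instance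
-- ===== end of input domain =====

-- B replaces A's slice-building early-return recursion by one left fold of a boolean accumulator.

-- ===== PORT A =====
-- A's recursion, on the character list: empty → True; else test word[0], recurse on word[1:] (the tail).
def isAllLowerRec (cs : List Char) : Bool :=
  match cs with
  | [] => true
  | c :: rest =>
    if (PySem.Chars.islower c == true) then isAllLowerRec rest else false

def is_all_lower (word : String) : Bool := isAllLowerRec word.toList

-- ===== PORT B =====
-- B's loop: ok = True; for c in word: ok = ok and c.islower(); return ok.
def is_all_lower_alt (word : String) : Bool :=
  word.toList.foldl (fun ok c => ok && PySem.Chars.islower c) true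

-- ===== PRECONDITION & SPEC =====
def Spec_is_all_lower (word : String) (out : Bool) : Prop := out = is_all_lower_alt word
instance (word : String) (out : Bool) : Decidable (Spec_is_all_lower word out) := by unfold Spec_is_all_lower; infer_instance

-- ===== CLAIM (what is proved, stated in full; the proofs are below) =====
def Claim_equal_is_all_lower : Prop := ∀ (word : String), Dom_is_all_lower word → Spec_is_all_lower word (is_all_lower word)

-- ===== LEMMAS AND PROOFS =====
theorem foldl_and_islower (cs : List Char) (b : Bool) :
    cs.foldl (fun ok c => ok && PySem.Chars.islower c) b = (b && isAllLowerRec cs) := by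
  induction cs generalizing b with
  | nil => simp [isAllLowerRec]
  | cons c rest ih =>
    simp only [List.foldl_cons, isAllLowerRec, ih]
    cases PySem.Chars.islower c <;> simp

-- ===== VERDICT (by name: the statement is the Claim_ definition above) =====
theorem is_all_lower_spec : Claim_equal_is_all_lower := by
  intro word _
  unfold Spec_is_all_lower is_all_lower is_all_lower_alt
  rw [foldl_and_islower]
  simp
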